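-- pv_equiv track=rewrite | github.com/odoo/odoo | venv/Lib/site-packages/reportlab/lib/rparsexml.py | unEscapeContentList
-- ===== SOURCE A (Python) =====
-- replacelist = [("&lt;", "<"), ("&gt;", ">"), ("&amp;", "&")] # amp must be last
--
-- def unEscapeContentList(contentList):
--     result = []
--     for e in contentList:
--         if "&" in e:
--             for (old, new) in replacelist:
--                 e = e.replace(old, new)
--         result.append(e)
--     return result
-- ===== SOURCE B (Python) =====
-- replacelist = [("&lt;", "<"), ("&gt;", ">"), ("&amp;", "&")] # amp must be last
--
-- _entities = (("&lt;", "<"), ("&gt;", ">"), ("&amp;", "&"))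
--
-- def _unescape(s):
--     out = []
--     i = 0
--     n = len(s)
--     while i < n:
--         if s[i] == "&":
--             for ent, ch in _entities:
--                 if s.startswith(ent, i):
--                     out.append(ch)
--                     i += len(ent)
--                     break
--             else:
--                 out.append(s[i])
--                 i += 1
--         else:
--             out.append(s[i])
--             i += 1
--     return "".join(out)
--
-- def unEscapeContentList(contentList):
--     return [_unescape(e) for e in contentList]
-- ===== Notes on version B (the rewrite author's own statement) =====
-- stated objective: alternative
-- what changed: Replaced A's three sequential full-string replace passes (after an '&' membership pre-scan) with a single left-to-right scan that, at each '&', matches one of the three entities via startswith and emits its replacement, copying all other characters once.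
import Mathlib
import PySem

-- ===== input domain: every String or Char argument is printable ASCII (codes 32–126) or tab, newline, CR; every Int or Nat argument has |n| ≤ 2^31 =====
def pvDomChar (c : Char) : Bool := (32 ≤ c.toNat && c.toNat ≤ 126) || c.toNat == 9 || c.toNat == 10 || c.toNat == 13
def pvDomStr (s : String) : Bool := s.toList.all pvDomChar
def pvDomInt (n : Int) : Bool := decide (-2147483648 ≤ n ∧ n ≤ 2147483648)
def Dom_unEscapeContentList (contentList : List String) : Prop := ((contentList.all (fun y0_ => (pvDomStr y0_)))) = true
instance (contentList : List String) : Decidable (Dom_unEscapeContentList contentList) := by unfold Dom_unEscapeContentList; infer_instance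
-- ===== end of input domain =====

-- B replaces A's three sequential full-string replace passes per string by a single
-- left-to-right entity scan (objective: alternative — same result, one pass instead of three).

-- ===== PORT A =====
def replacelist : List (String × String) := [("&lt;", "<"), ("&gt;", ">"), ("&amp;", "&")] -- amp must be last

def unEscapeContentList (contentList : List String) : List String :=
  contentList.foldl
    (fun result e =>
      result ++ [if PySem.Str.isIn "&" e then
                   replacelist.foldl (fun e p => PySem.Str.replace e p.1 p.2) e
                 else e])
    []

-- ===== PORT B =====
-- single left-to-right scan: at each position try the three entities (startswith), else copy the char
def unescChars : List Char → List Char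
  | [] => []
  | c :: t =>
    if ['&','l','t',';'].isPrefixOf (c :: t) then '<' :: unescChars (t.drop 3)
    else if ['&','g','t',';'].isPrefixOf (c :: t) then '>' :: unescChars (t.drop 3)
    else if ['&','a','m','p',';'].isPrefixOf (c :: t) then '&' :: unescChars (t.drop 4)
    else c :: unescChars t
termination_by s => s.length
decreasing_by all_goals simp [List.length_drop]

def unEscapeContentList_alt (contentList : List String) : List String :=
  contentList.map (fun e => String.ofList (unescChars e.toList))

-- ===== PRECONDITION & SPEC =====
def Spec_unEscapeContentList (contentList : List String) (out : List String) : Prop := out = unEscapeContentList_alt contentList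
instance (contentList : List String) (out : List String) : Decidable (Spec_unEscapeContentList contentList out) := by unfold Spec_unEscapeContentList; infer_instance

-- ===== CLAIM (what is proved, stated in full; the proofs are below) =====
def Claim_equal_unEscapeContentList : Prop := ∀ (contentList : List String), Dom_unEscapeContentList contentList → Spec_unEscapeContentList contentList (unEscapeContentList contentList)

-- ===== LEMMAS AND PROOFS =====

-- PySem.Chars.replace.go is fuel-insensitive (beyond the remaining length) and linear in its accumulator
lemma replace_go_acc (old new : List Char) (hold : old ≠ []) :
    ∀ fuel l acc, l.length ≤ fuel →
      PySem.Chars.replace.go old new fuel l acc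
        = acc.reverse ++ PySem.Chars.replace.go old new l.length l [] := by
  intro fuel
  induction fuel using Nat.strong_induction_on with
  | _ fuel ih =>
    intro l acc h
    cases fuel with
    | zero =>
      have hl : l = [] := by
        cases l with
        | nil => rfl
        | cons c t => simp at h
      subst hl
      simp [PySem.Chars.replace.go]
    | succ n =>
      cases l with
      | nil => simp [PySem.Chars.replace.go]
      | cons c t =>
        have hlen : 1 ≤ old.length := by
          cases old with
          | nil => exact absurd rfl hold
          | cons _ _ => simp
        have ht : t.length ≤ n := by simp at h; omega
        by_cases hp : old.isPrefixOf (c :: t)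
        · have hd1 : ((c :: t).drop old.length).length ≤ n := by
            simp at h ⊢; omega
          have hd2 : ((c :: t).drop old.length).length ≤ t.length := by
            simp; omega
          simp only [PySem.Chars.replace.go, hp, if_pos, List.length_cons]
          rw [ih n (by omega) _ _ hd1, ih t.length (by omega) _ _ hd2]
          simp
        · simp only [PySem.Chars.replace.go, hp, List.length_cons]
          rw [ih n (by omega) _ _ ht, ih t.length (by omega) t [c] (le_refl t.length)]
          simp

lemma replace_nil (old new : List Char) (hold : old ≠ []) :
    PySem.Chars.replace [] old new = [] := by
  simp [PySem.Chars.replace, PySem.Chars.replace.go, hold]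

lemma replace_cons_not_prefix {old : List Char} (new : List Char) {c : Char} {t : List Char}
    (hold : old ≠ []) (h : ¬ old <+: (c :: t)) :
    PySem.Chars.replace (c :: t) old new = c :: PySem.Chars.replace t old new := by
  have hp : old.isPrefixOf (c :: t) = false := by
    rw [Bool.eq_false_iff]
    intro hc
    exact h (List.isPrefixOf_iff_prefix.mp hc)
  simp only [PySem.Chars.replace, List.isEmpty_eq_false_iff.mpr hold, List.length_cons,
    Bool.false_eq_true]
  simp only [PySem.Chars.replace.go, hp, Bool.false_eq_true, ite_false]
  rw [replace_go_acc old new hold t.length t [c] (le_refl _)]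
  simp

lemma replace_of_prefix {old : List Char} (new : List Char) {l : List Char}
    (hold : old ≠ []) (h : old <+: l) :
    PySem.Chars.replace l old new = new ++ PySem.Chars.replace (l.drop old.length) old new := by
  have hlen : 1 ≤ old.length := by
    cases old with
    | nil => exact absurd rfl hold
    | cons _ _ => simp
  cases l with
  | nil =>
    have : old = [] := List.prefix_nil.mp h
    exact absurd this hold
  | cons c t =>
    have hp : old.isPrefixOf (c :: t) = true := List.isPrefixOf_iff_prefix.mpr h
    have hd2 : ((c :: t).drop old.length).length ≤ t.length := by simp; omega
    simp only [PySem.Chars.replace, List.isEmpty_eq_false_iff.mpr hold, Bool.false_eq_true,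
      List.length_cons]
    simp only [PySem.Chars.replace.go, hp, if_pos]
    rw [replace_go_acc old new hold t.length _ _ hd2]
    simp

-- a pattern avoiding the (single-char) replacement text survives backwards through replace
lemma prefix_replace {old : List Char} {n0 : Char} {p : List Char}
    (hold : old ≠ []) (hp : ∀ x ∈ p, x ≠ n0) :
    ∀ l, p <+: PySem.Chars.replace l old [n0] → p <+: l := by
  induction p with
  | nil => intro l _; exact List.nil_prefix
  | cons x p' ih =>
    intro l hpre
    cases l with
    | nil =>
      rw [replace_nil _ _ hold] at hpre
      simpa using List.prefix_nil.mp hpre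
    | cons c t =>
      by_cases hP : old <+: (c :: t)
      · rw [replace_of_prefix _ hold hP] at hpre
        have := (List.cons_prefix_cons.mp hpre).1
        exact absurd this (hp x (by simp))
      · rw [replace_cons_not_prefix _ hold hP] at hpre
        obtain ⟨hx, hrest⟩ := List.cons_prefix_cons.mp hpre
        exact List.cons_prefix_cons.mpr ⟨hx, ih (fun y hy => hp y (by simp [hy])) t hrest⟩

-- strings without '&' are fixed points of the scanner
lemma unescChars_no_amp : ∀ l : List Char, '&' ∉ l → unescChars l = l := by
  intro l
  induction l using unescChars.induct with
  | case1 => intro _; simp [unescChars]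
  | case2 c t h1 ih =>
    intro hmem
    have hc : '&' = c := (List.cons_prefix_cons.mp (List.isPrefixOf_iff_prefix.mp h1)).1
    subst hc
    simp at hmem
  | case3 c t h1 h2 ih =>
    intro hmem
    have hc : '&' = c := (List.cons_prefix_cons.mp (List.isPrefixOf_iff_prefix.mp h2)).1
    subst hc
    simp at hmem
  | case4 c t h1 h2 h3 ih =>
    intro hmem
    have hc : '&' = c := (List.cons_prefix_cons.mp (List.isPrefixOf_iff_prefix.mp h3)).1
    subst hc
    simp at hmem
  | case5 c t h1 h2 h3 ih =>
    intro hmem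
    rw [unescChars]
    simp only [h1, h2, h3, Bool.false_eq_true, ite_false]
    rw [ih (fun hc => hmem (by simp [hc]))]

lemma replace_cons_ne {old : List Char} (new : List Char) {c : Char} {t : List Char}
    (hold : old ≠ []) (hhead : old.head? ≠ some c) :
    PySem.Chars.replace (c :: t) old new = c :: PySem.Chars.replace t old new := by
  apply replace_cons_not_prefix _ hold
  intro h
  cases old with
  | nil => exact hold rfl
  | cons o os =>
    exact hhead (by simp [(List.cons_prefix_cons.mp h).1])

-- the heart: A's three sequential replaces equal B's single scan
lemma replace3_eq_unescChars : ∀ l : List Char,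
    PySem.Chars.replace
      (PySem.Chars.replace
        (PySem.Chars.replace l ['&','l','t',';'] ['<'])
        ['&','g','t',';'] ['>'])
      ['&','a','m','p',';'] ['&']
      = unescChars l := by
  intro l
  induction l using unescChars.induct with
  | case1 =>
    rw [replace_nil _ _ (by simp), replace_nil _ _ (by simp), replace_nil _ _ (by simp)]
    simp [unescChars]
  | case2 c t h1 ih =>
    obtain ⟨u, hu⟩ := List.isPrefixOf_iff_prefix.mp h1
    obtain ⟨hc, ht⟩ : c = '&' ∧ t = 'l' :: 't' :: ';' :: u := by simpa using hu.symm
    subst hc; subst ht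
    have e1 : PySem.Chars.replace ('&'::'l'::'t'::';'::u) ['&','l','t',';'] ['<']
        = '<' :: PySem.Chars.replace u ['&','l','t',';'] ['<'] := by
      rw [replace_of_prefix _ (by simp) (List.isPrefixOf_iff_prefix.mp h1)]; simp
    rw [e1, replace_cons_ne _ (by simp) (by simp), replace_cons_ne _ (by simp) (by simp)]
    rw [unescChars]
    simp only [h1, if_pos]
    simpa using ih
  | case3 c t h1 h2 ih =>
    obtain ⟨u, hu⟩ := List.isPrefixOf_iff_prefix.mp h2
    obtain ⟨hc, ht⟩ : c = '&' ∧ t = 'g' :: 't' :: ';' :: u := by simpa using hu.symm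
    subst hc; subst ht
    have e1 : PySem.Chars.replace ('&'::'g'::'t'::';'::u) ['&','l','t',';'] ['<']
        = '&'::'g'::'t'::';':: PySem.Chars.replace u ['&','l','t',';'] ['<'] := by
      rw [replace_cons_not_prefix _ (by simp) (by simp [List.cons_prefix_cons]),
        replace_cons_ne _ (by simp) (by simp), replace_cons_ne _ (by simp) (by simp),
        replace_cons_ne _ (by simp) (by simp)]
    have e2 : PySem.Chars.replace ('&'::'g'::'t'::';':: PySem.Chars.replace u ['&','l','t',';'] ['<'])
          ['&','g','t',';'] ['>']
        = '>' :: PySem.Chars.replace (PySem.Chars.replace u ['&','l','t',';'] ['<']) ['&','g','t',';'] ['>'] := by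
      rw [replace_of_prefix _ (by simp) (by simp [List.cons_prefix_cons])]; simp
    rw [e1, e2, replace_cons_ne _ (by simp) (by simp)]
    rw [unescChars]
    simp only [h1, h2, Bool.false_eq_true, ite_false, if_pos]
    simpa using ih
  | case4 c t h1 h2 h3 ih =>
    obtain ⟨u, hu⟩ := List.isPrefixOf_iff_prefix.mp h3
    obtain ⟨hc, ht⟩ : c = '&' ∧ t = 'a' :: 'm' :: 'p' :: ';' :: u := by simpa using hu.symm
    subst hc; subst ht
    have e1 : PySem.Chars.replace ('&'::'a'::'m'::'p'::';'::u) ['&','l','t',';'] ['<']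
        = '&'::'a'::'m'::'p'::';':: PySem.Chars.replace u ['&','l','t',';'] ['<'] := by
      rw [replace_cons_not_prefix _ (by simp) (by simp [List.cons_prefix_cons]),
        replace_cons_ne _ (by simp) (by simp), replace_cons_ne _ (by simp) (by simp),
        replace_cons_ne _ (by simp) (by simp), replace_cons_ne _ (by simp) (by simp)]
    have e2 : PySem.Chars.replace ('&'::'a'::'m'::'p'::';':: PySem.Chars.replace u ['&','l','t',';'] ['<'])
          ['&','g','t',';'] ['>']
        = '&'::'a'::'m'::'p'::';':: PySem.Chars.replace (PySem.Chars.replace u ['&','l','t',';'] ['<']) ['&','g','t',';'] ['>'] := by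
      rw [replace_cons_not_prefix _ (by simp) (by simp [List.cons_prefix_cons]),
        replace_cons_ne _ (by simp) (by simp), replace_cons_ne _ (by simp) (by simp),
        replace_cons_ne _ (by simp) (by simp), replace_cons_ne _ (by simp) (by simp)]
    have e3 : PySem.Chars.replace
          ('&'::'a'::'m'::'p'::';':: PySem.Chars.replace (PySem.Chars.replace u ['&','l','t',';'] ['<']) ['&','g','t',';'] ['>'])
          ['&','a','m','p',';'] ['&']
        = '&' :: PySem.Chars.replace (PySem.Chars.replace (PySem.Chars.replace u ['&','l','t',';'] ['<']) ['&','g','t',';'] ['>']) ['&','a','m','p',';'] ['&'] := by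
      rw [replace_of_prefix _ (by simp) (by simp [List.cons_prefix_cons])]; simp
    rw [e1, e2, e3]
    rw [unescChars]
    simp only [h1, h2, h3, Bool.false_eq_true, ite_false, if_pos]
    simpa using ih
  | case5 c t h1 h2 h3 ih =>
    have hn1 : ¬ (['&','l','t',';'] <+: (c :: t)) := fun h => by
      rw [List.isPrefixOf_iff_prefix.mpr h] at h1; simp at h1
    have hn2 : ¬ (['&','g','t',';'] <+: (c :: t)) := fun h => by
      rw [List.isPrefixOf_iff_prefix.mpr h] at h2; simp at h2
    have hn3 : ¬ (['&','a','m','p',';'] <+: (c :: t)) := fun h => by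
      rw [List.isPrefixOf_iff_prefix.mpr h] at h3; simp at h3
    rw [replace_cons_not_prefix _ (by simp) hn1]
    have hn2' : ¬ (['&','g','t',';'] <+: (c :: PySem.Chars.replace t ['&','l','t',';'] ['<'])) := by
      intro h
      obtain ⟨hx, hrest⟩ := List.cons_prefix_cons.mp h
      have := prefix_replace (p := ['g','t',';']) (by simp) (by simp) t hrest
      exact hn2 (List.cons_prefix_cons.mpr ⟨hx, this⟩)
    rw [replace_cons_not_prefix _ (by simp) hn2']
    have hn3' : ¬ (['&','a','m','p',';'] <+:
        (c :: PySem.Chars.replace (PySem.Chars.replace t ['&','l','t',';'] ['<']) ['&','g','t',';'] ['>'])) := by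
      intro h
      obtain ⟨hx, hrest⟩ := List.cons_prefix_cons.mp h
      have h2' := prefix_replace (p := ['a','m','p',';']) (by simp) (by simp) _ hrest
      have h1' := prefix_replace (p := ['a','m','p',';']) (by simp) (by simp) t h2'
      exact hn3 (List.cons_prefix_cons.mpr ⟨hx, h1'⟩)
    rw [replace_cons_not_prefix _ (by simp) hn3']
    rw [unescChars]
    simp only [h1, h2, h3, Bool.false_eq_true, ite_false]
    rw [ih]

-- ===== VERDICT (by name: the statement is the Claim_ definition above) =====
theorem unEscapeContentList_spec : Claim_equal_unEscapeContentList := by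
  intro contentList _
  unfold Spec_unEscapeContentList unEscapeContentList unEscapeContentList_alt
  rw [PySem.List.foldl_append_singleton_eq_map]
  apply List.map_congr_left
  intro e _
  by_cases h : PySem.Str.isIn "&" e
  · rw [if_pos h]
    simp only [replacelist, List.foldl_cons, List.foldl_nil]
    simp only [PySem.Str.replace, String.toList_ofList]
    rw [show ("&lt;" : String).toList = ['&','l','t',';'] from rfl,
        show ("&gt;" : String).toList = ['&','g','t',';'] from rfl,
        show ("&amp;" : String).toList = ['&','a','m','p',';'] from rfl,
        show ("<" : String).toList = ['<'] from rfl,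
        show (">" : String).toList = ['>'] from rfl,
        show ("&" : String).toList = ['&'] from rfl]
    rw [replace3_eq_unescChars]
  · rw [if_neg h]
    have hmem : '&' ∉ e.toList := by
      intro hm
      exact h (by
        rw [PySem.Str.isIn_iff_infix]
        simpa using (List.singleton_infix_iff '&' e.toList).mpr hm)
    rw [unescChars_no_amp _ hmem, String.ofList_toList]
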